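-- pv_equiv track=rewrite | github.com/michaelcini/Torrent-play | yts_scraper.py | get_best_torrent
-- ===== SOURCE A (Python) =====
-- from typing import List, Dict, Optional
--
-- def get_best_torrent(movie: Dict, preferred_quality: str = "720p") -> Optional[Dict]:
--     """
--     Get the best available torrent for a movie based on quality preference
--     """
--     torrents = movie.get('torrents', [])
--     if not torrents:
--         return None
--
--     # Sort by quality preference
--     quality_order = ['2160p', '1080p', '720p', '480p']
--     if preferred_quality in quality_order:
--         preferred_index = quality_order.index(preferred_quality)
--         quality_order = [preferred_quality] + [q for q in quality_order if q != preferred_quality]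
--
--     for quality in quality_order:
--         for torrent in torrents:
--             if torrent.get('quality') == quality:
--                 return torrent
--
--     # If no preferred quality found, return the first available
--     return torrents[0] if torrents else None
-- ===== SOURCE B (Python) =====
-- def get_best_torrent(movie, preferred_quality="720p"):
--     torrents = movie.get('torrents', [])
--     if not torrents:
--         return None
--     quality_order = ['2160p', '1080p', '720p', '480p']
--     if preferred_quality in quality_order:
--         quality_order = [preferred_quality] + [q for q in quality_order if q != preferred_quality]
--     rank = {q: i for i, q in enumerate(quality_order)}
--     big = len(quality_order)
--     best = torrents[0]
--     best_rank = rank.get(best.get('quality'), big)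
--     for t in torrents[1:]:
--         r = rank.get(t.get('quality'), big)
--         if r < best_rank:
--             best, best_rank = t, r
--     return best
-- ===== Notes on version B (the rewrite author's own statement) =====
-- stated objective: simpler
-- what changed: A's nested quality-preference-by-torrent scans are replaced by a rank dict built once from the quality order plus a single first-argmin pass over the torrents (unknown/missing qualities share one sentinel rank, so the fallback to torrents[0] falls out of the same pass).
import Mathlib
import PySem

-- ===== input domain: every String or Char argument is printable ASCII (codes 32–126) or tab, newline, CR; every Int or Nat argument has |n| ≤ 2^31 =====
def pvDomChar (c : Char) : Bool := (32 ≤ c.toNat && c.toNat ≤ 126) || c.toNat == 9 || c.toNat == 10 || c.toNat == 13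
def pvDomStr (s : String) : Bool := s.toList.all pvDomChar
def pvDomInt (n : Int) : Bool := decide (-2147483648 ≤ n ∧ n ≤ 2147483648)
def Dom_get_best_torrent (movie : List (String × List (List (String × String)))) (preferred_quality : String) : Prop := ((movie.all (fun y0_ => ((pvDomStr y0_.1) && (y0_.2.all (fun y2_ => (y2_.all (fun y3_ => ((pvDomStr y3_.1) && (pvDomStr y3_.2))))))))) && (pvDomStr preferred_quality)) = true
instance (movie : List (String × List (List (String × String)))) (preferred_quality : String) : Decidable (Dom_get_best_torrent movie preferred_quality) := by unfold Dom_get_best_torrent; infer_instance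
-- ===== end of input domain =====

-- B replaces A's nested quality-by-torrent scans with a rank table plus one argmin pass (objective: simpler, same result proved equal).

-- ===== PORT A =====
-- inner nested loop of A: for quality in order: for torrent in torrents: if torrent.get('quality') == quality: return torrent
def loopA (order : List String) (torrents : List (List (String × String))) : Option (List (String × String)) :=
  match order with
  | [] => none
  | q :: rest =>
    match torrents.find? (fun t => (PySem.Dict.mk t).get? "quality" == some q) with
    | some t => some t
    | none => loopA rest torrents

def get_best_torrent (movie : List (String × List (List (String × String)))) (preferred_quality : String) : Option (List (String × String)) :=
  let torrents := (PySem.Dict.mk movie).getD "torrents" []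
  if torrents.isEmpty then none
  else
    let quality_order := ["2160p", "1080p", "720p", "480p"]
    let quality_order := if quality_order.contains preferred_quality then
        preferred_quality :: (quality_order.filter (fun q => q ≠ preferred_quality))
      else quality_order
    match loopA quality_order torrents with
    | some t => some t
    | none => if torrents.isEmpty then none else PySem.List.pyGet? torrents 0

-- ===== PORT B =====
-- rank = {q: i for i, q in enumerate(quality_order)}  (distinct keys, so a literal dict)
def pvRankDict (order : List String) : PySem.Dict String Int :=
  PySem.Dict.mk ((PySem.List.enumerate order 0).map (fun p => (p.2, p.1)))

-- rank.get(t.get('quality'), big)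
def rankOf (rd : PySem.Dict String Int) (big : Int) (t : List (String × String)) : Int :=
  match (PySem.Dict.mk t).get? "quality" with
  | some q => rd.getD q big
  | none => big

-- the single argmin pass of B, carrying (best, best_rank)
def bLoop (rd : PySem.Dict String Int) (big : Int) (best : List (String × String)) (bestRank : Int)
    (rest : List (List (String × String))) : List (String × String) :=
  match rest with
  | [] => best
  | t :: ts =>
    let r := rankOf rd big t
    if r < bestRank then bLoop rd big t r ts else bLoop rd big best bestRank ts

def get_best_torrent_alt (movie : List (String × List (List (String × String)))) (preferred_quality : String) : Option (List (String × String)) :=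
  let torrents := (PySem.Dict.mk movie).getD "torrents" []
  match torrents with
  | [] => none
  | x :: rest =>
    let quality_order := ["2160p", "1080p", "720p", "480p"]
    let quality_order := if quality_order.contains preferred_quality then
        preferred_quality :: (quality_order.filter (fun q => q ≠ preferred_quality))
      else quality_order
    let rd := pvRankDict quality_order
    let big : Int := (quality_order.length : Int)
    some (bLoop rd big x (rankOf rd big x) rest)

-- ===== PRECONDITION & SPEC =====
def Spec_get_best_torrent (movie : List (String × List (List (String × String)))) (preferred_quality : String) (out : Option (List (String × String))) : Prop := out = get_best_torrent_alt movie preferred_quality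
instance (movie : List (String × List (List (String × String)))) (preferred_quality : String) (out : Option (List (String × String))) : Decidable (Spec_get_best_torrent movie preferred_quality out) := by unfold Spec_get_best_torrent; infer_instance

-- ===== CLAIM (what is proved, stated in full; the proofs are below) =====
def Claim_equal_get_best_torrent : Prop := ∀ (movie : List (String × List (List (String × String)))) (preferred_quality : String), Dom_get_best_torrent movie preferred_quality → Spec_get_best_torrent movie preferred_quality (get_best_torrent movie preferred_quality)

-- ===== LEMMAS AND PROOFS =====

-- index of the first occurrence of q in order, or order.length if absent
def idxOr (order : List String) (q : String) : Int :=
  match order with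
  | [] => 0
  | a :: rest => if q = a then 0 else 1 + idxOr rest q

-- the rank A's quality_order assigns to a torrent
def rankSpec (order : List String) (t : List (String × String)) : Int :=
  match (PySem.Dict.mk t).get? "quality" with
  | some q => idxOr order q
  | none => (order.length : Int)

-- first-argmin accumulator, the mathematical shape of bLoop
def fam (f : List (String × String) → Int) (b : List (String × String)) (xs : List (List (String × String))) : List (String × String) :=
  match xs with
  | [] => b
  | t :: ts => if f t < f b then fam f t ts else fam f b ts

theorem idxOr_nonneg (order : List String) (q : String) : 0 ≤ idxOr order q := by
  induction order with
  | nil => simp [idxOr]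
  | cons a rest ih => simp only [idxOr]; split <;> omega

theorem rankSpec_nonneg (order : List String) (t : List (String × String)) : 0 ≤ rankSpec order t := by
  unfold rankSpec
  cases (PySem.Dict.mk t).get? "quality" with
  | none => positivity
  | some q => exact idxOr_nonneg order q

theorem rankSpec_nil (t : List (String × String)) : rankSpec [] t = 0 := by
  unfold rankSpec
  cases (PySem.Dict.mk t).get? "quality" <;> simp [idxOr]

theorem rank_lemma (order : List String) (start : Int) (q : String) :
    (PySem.Dict.mk ((PySem.List.enumerate order start).map (fun p => (p.2, p.1)))).getD q (start + (order.length : Int)) = start + idxOr order q := by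
  induction order generalizing start with
  | nil =>
    simp [PySem.List.enumerate, idxOr, PySem.Dict.getD_eq_get?_getD, PySem.Dict.get?]
  | cons a rest ih =>
    rw [PySem.List.enumerate_cons, List.map_cons]
    rw [PySem.Dict.getD_eq_get?_getD, PySem.Dict.get?_mk_cons]
    by_cases h : q = a
    · simp [h, idxOr]
    · have hne : (a == q) = false := by simp; exact fun e => h e.symm
      rw [hne]
      simp only [Bool.false_eq_true, if_false]
      have := ih (start + 1) -- getD (mk …) q ((start+1) + rest.length) = (start+1) + idxOr rest q
      rw [PySem.Dict.getD_eq_get?_getD] at this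
      have hdflt : start + ((rest.length : Int) + 1) = (start + 1) + (rest.length : Int) := by ring
      simp only [List.length_cons, Nat.cast_add, Nat.cast_one, hdflt]
      rw [this]
      simp only [idxOr, h, if_false]
      ring

theorem rankOf_eq (order : List String) (t : List (String × String)) :
    rankOf (pvRankDict order) (order.length : Int) t = rankSpec order t := by
  unfold rankOf rankSpec pvRankDict
  cases (PySem.Dict.mk t).get? "quality" with
  | none => rfl
  | some q =>
    have := rank_lemma order 0 q
    simpa using this

theorem famZ (f : List (String × String) → Int) (h0 : ∀ t, 0 ≤ f t)
    (b : List (String × String)) (hb : f b = 0) (xs : List (List (String × String))) :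
    fam f b xs = b := by
  induction xs with
  | nil => rfl
  | cons t ts ih =>
    unfold fam
    have : ¬ f t < f b := by have := h0 t; omega
    simp only [this, if_false]
    exact ih

theorem famB0 (f : List (String × String) → Int) (h0 : ∀ t, 0 ≤ f t) :
    ∀ (xs : List (List (String × String))) (b t : List (String × String)),
      (b :: xs).find? (fun u => decide (f u = 0)) = some t → fam f b xs = t := by
  intro xs
  induction xs with
  | nil =>
    intro b t h
    simp only [List.find?] at h
    by_cases hb : f b = 0
    · simp [hb] at h; simp [fam, h]
    · simp [hb] at h
  | cons u us ih =>
    intro b t h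
    by_cases hb : f b = 0
    · rw [List.find?_cons_of_pos (by simp [hb])] at h
      cases h
      exact famZ f h0 b hb (u :: us)
    · rw [List.find?_cons_of_neg (by simp [hb])] at h
      unfold fam
      by_cases hu : f u = 0
      · rw [List.find?_cons_of_pos (by simp [hu])] at h
        cases h
        have hlt : f u < f b := by have := h0 b; omega
        simp only [hlt, if_true]
        exact famZ f h0 u hu us
      · rw [List.find?_cons_of_neg (by simp [hu])] at h
        by_cases hc : f u < f b
        · simp only [hc, if_true]
          exact ih u t (by rw [List.find?_cons_of_neg (by simp [hu])]; exact h)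
        · simp only [hc, if_false]
          exact ih b t (by rw [List.find?_cons_of_neg (by simp [hb])]; exact h)

theorem fam_shift (f g : List (String × String) → Int) :
    ∀ (xs : List (List (String × String))) (b : List (String × String)),
      f b = 1 + g b → (∀ t ∈ xs, f t = 1 + g t) → fam f b xs = fam g b xs := by
  intro xs
  induction xs with
  | nil => intro b _ _; rfl
  | cons t ts ih =>
    intro b hb hxs
    have ht : f t = 1 + g t := hxs t (by simp)
    have hts : ∀ u ∈ ts, f u = 1 + g u := fun u hu => hxs u (by simp [hu])
    unfold fam
    have hcond : f t < f b ↔ g t < g b := by rw [ht, hb]; omega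
    by_cases hc : g t < g b
    <;> rw [if_congr hcond rfl rfl]
    · simp only [hc, if_true]; exact ih t ht hts
    · simp only [hc, if_false]; exact ih b hb hts

theorem find?_congr' (p p' : List (String × String) → Bool) :
    ∀ (xs : List (List (String × String))), (∀ u ∈ xs, p u = p' u) → xs.find? p = xs.find? p' := by
  intro xs
  induction xs with
  | nil => intro _; rfl
  | cons u us ih =>
    intro h
    have hu := h u (by simp)
    simp only [List.find?, hu]
    cases p' u
    · exact ih (fun v hv => h v (by simp [hv]))
    · rfl

theorem pred_eq (q : String) (rest : List String) (u : List (String × String)) :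
    ((PySem.Dict.mk u).get? "quality" == some q) = decide (rankSpec (q :: rest) u = 0) := by
  unfold rankSpec
  cases h : (PySem.Dict.mk u).get? "quality" with
  | none =>
    have : ¬ (((rest.length : Nat) : Int) + 1 = 0) := by positivity
    simp [this]
  | some q' =>
    simp only [idxOr]
    by_cases hq : q' = q
    · simp [hq]
    · have hne : ¬ (1 + idxOr rest q' = 0) := by have := idxOr_nonneg rest q'; omega
      simp [hq, hne]

theorem mainLemma (order : List String) (x : List (String × String)) (xs : List (List (String × String))) :
    (loopA order (x :: xs)).getD x = fam (rankSpec order) x xs := by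
  induction order with
  | nil =>
    simp only [loopA, Option.getD_none]
    exact (famZ (rankSpec []) (rankSpec_nonneg []) x (rankSpec_nil x) xs).symm
  | cons q rest ih =>
    unfold loopA
    have hcongr : (x :: xs).find? (fun t => (PySem.Dict.mk t).get? "quality" == some q)
        = (x :: xs).find? (fun u => decide (rankSpec (q :: rest) u = 0)) := by
      exact find?_congr' _ _ (x :: xs) (fun u _ => pred_eq q rest u)
    cases h : (x :: xs).find? (fun t => (PySem.Dict.mk t).get? "quality" == some q) with
    | some t =>
      simp only [Option.getD_some]
      exact (famB0 (rankSpec (q :: rest)) (rankSpec_nonneg (q :: rest)) xs x t (hcongr ▸ h)).symm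
    | none =>
      have hall : ∀ u ∈ x :: xs, ((PySem.Dict.mk u).get? "quality" == some q) = false := by
        intro u hu
        exact Bool.eq_false_iff.mpr (List.find?_eq_none.mp h u hu)
      have hshift : ∀ u ∈ x :: xs, rankSpec (q :: rest) u = 1 + rankSpec rest u := by
        intro u hu
        have hne := hall u hu
        unfold rankSpec
        cases hq : (PySem.Dict.mk u).get? "quality" with
        | none => simp [List.length_cons]; ring
        | some q' =>
          rw [hq] at hne
          have : q' ≠ q := by simpa [beq_iff_eq] using hne
          simp [idxOr, this]
      rw [ih]
      exact (fam_shift (rankSpec (q :: rest)) (rankSpec rest) xs x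
        (hshift x (by simp)) (fun u hu => hshift u (by simp [hu]))).symm

theorem bridge (order : List String) :
    ∀ (ts : List (List (String × String))) (b : List (String × String)),
      bLoop (pvRankDict order) (order.length : Int) b (rankOf (pvRankDict order) (order.length : Int) b) ts
        = fam (rankSpec order) b ts := by
  intro ts
  induction ts with
  | nil => intro b; rfl
  | cons t us ih =>
    intro b
    unfold bLoop fam
    rw [rankOf_eq, rankOf_eq]
    by_cases hc : rankSpec order t < rankSpec order b
    · simp only [hc, if_true]
      have := ih t
      rw [rankOf_eq] at this
      exact this
    · simp only [hc, if_false]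
      have := ih b
      rw [rankOf_eq] at this
      exact this

-- ===== VERDICT (by name: the statement is the Claim_ definition above) =====
theorem get_best_torrent_spec : Claim_equal_get_best_torrent := by
  intro movie preferred_quality _dom
  unfold Spec_get_best_torrent get_best_torrent get_best_torrent_alt
  cases htor : (PySem.Dict.mk movie).getD "torrents" [] with
  | nil => simp
  | cons x xs =>
    simp only [List.isEmpty_cons, Bool.false_eq_true, if_false]
    rw [bridge]
    rw [← mainLemma]
    cases h : loopA (if ["2160p", "1080p", "720p", "480p"].contains preferred_quality then
        preferred_quality :: (["2160p", "1080p", "720p", "480p"].filter (fun q => q ≠ preferred_quality))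
      else ["2160p", "1080p", "720p", "480p"]) (x :: xs) with
    | some t => simp
    | none => simp
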